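-- pv_equiv track=rewrite | github.com/saorregog/practicaConPython | 14. Prueba r2longestPalindrome/r2longestPalindrome.py | r2longestPalindrome2
-- ===== SOURCE A (Python) =====
-- def r2longestPalindrome2(strParam):
--     strParam = strParam.lower().split()
--     strParam = "".join(strParam)
--
--     result = int(0)
--
--     for i in range(len(strParam)):
--         for j in range(len(strParam), i, -1):
--             str_reversed = strParam[i:j]
--             if (str_reversed[::-1] in strParam and len(str_reversed) > result):
--                 result = len(str_reversed)
--
--     return result
-- ===== SOURCE B (Python) =====
-- def r2longestPalindrome2(strParam):
--     # Longest substring whose reverse also occurs in the normalized string.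
--     # The property "some length-L window's reversal occurs among the length-L
--     # windows" is monotone in L, so binary-search the answer length; each probe
--     # uses a hash set of windows instead of A's quadratic substring scans.
--     t = "".join(strParam.lower().split())
--     n = len(t)
--
--     def ok(L):
--         subs = {t[k:k + L] for k in range(n - L + 1)}
--         return any(t[i:i + L][::-1] in subs for i in range(n - L + 1))
--
--     lo, hi = 0, n
--     while lo < hi:
--         mid = (lo + hi + 1) // 2
--         if ok(mid):
--             lo = mid
--         else:
--             hi = mid - 1
--     return lo
-- ===== Notes on version B (the rewrite author's own statement) =====
-- stated objective: faster
-- what changed: A scans all O(n^2) substrings keeping a running max and re-scans the string for each reversed candidate; B binary-searches the answer length (the property 'some length-L window's reversal occurs' is monotone in L), each probe checking reversed windows against a hash set of all same-length windows.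
import Mathlib
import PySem

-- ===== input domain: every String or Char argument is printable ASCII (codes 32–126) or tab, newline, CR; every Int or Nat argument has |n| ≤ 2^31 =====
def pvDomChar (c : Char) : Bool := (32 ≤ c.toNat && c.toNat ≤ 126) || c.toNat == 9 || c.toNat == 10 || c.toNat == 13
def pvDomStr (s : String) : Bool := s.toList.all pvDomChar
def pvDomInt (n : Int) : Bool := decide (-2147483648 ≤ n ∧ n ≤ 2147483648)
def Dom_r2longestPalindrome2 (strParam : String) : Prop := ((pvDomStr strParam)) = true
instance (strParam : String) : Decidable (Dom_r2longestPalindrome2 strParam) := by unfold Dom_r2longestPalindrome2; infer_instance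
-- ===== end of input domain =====

-- B replaces A's scan of all O(n^2) substrings with a binary search on the answer
-- length, each probe checking reversed windows against a set of same-length windows
-- (objective: faster).

-- ===== PORT A =====
def r2longestPalindrome2 (strParam : String) : Int :=
  let t : List Char := PySem.Chars.join [] (PySem.Chars.split₀ (PySem.Chars.lower strParam.toList))
  let n : Int := PySem.Chars.len t
  (PySem.List.pyRange 0 n 1).foldl (fun result i =>
    (PySem.List.pyRange n i (-1)).foldl (fun result j =>
      let strReversed := PySem.List.slice t (some i) (some j)
      -- str_reversed[::-1]: step -1 never raises, so .getD [] is exact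
      if PySem.Chars.isIn ((PySem.List.slice? strReversed none none (-1)).getD []) t
           && decide (result < (strReversed.length : Int))
      then (strReversed.length : Int) else result) result) 0

-- ===== PORT B =====
-- B's local probe ok(L): is some length-L window's reversal among the length-L windows?
def r2ok (t : List Char) (n L : Int) : Bool :=
  let subs : PySem.Set (List Char) :=
    PySem.Set.ofList ((PySem.List.pyRange 0 (n - L + 1) 1).map
      (fun k => PySem.List.slice t (some k) (some (k + L))))
  (PySem.List.pyRange 0 (n - L + 1) 1).any (fun i =>
    PySem.Set.contains subs
      -- t[i:i+L][::-1]: step -1 never raises, so .getD [] is exact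
      ((PySem.List.slice? (PySem.List.slice t (some i) (some (i + L))) none none (-1)).getD []))

-- B's 'while lo < hi' binary-search loop, recursion on hi - lo
def r2search (t : List Char) (n lo hi : Int) : Int :=
  if _h : lo < hi then
    -- mid = (lo + hi + 1) // 2, written out at each use
    if r2ok t n (PySem.Int.floordiv (lo + hi + 1) 2) then
      r2search t n (PySem.Int.floordiv (lo + hi + 1) 2) hi
    else
      r2search t n lo (PySem.Int.floordiv (lo + hi + 1) 2 - 1)
  else lo
termination_by (hi - lo).toNat
decreasing_by
  · have h1 : lo + 1 ≤ PySem.Int.floordiv (lo + hi + 1) 2 :=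
      (PySem.Int.le_floordiv_iff_mul_le (a := lo + hi + 1) (b := 2) (q := lo + 1) (by omega)).mpr (by omega)
    omega
  · have h2 : PySem.Int.floordiv (lo + hi + 1) 2 ≤ hi := by
      have := (PySem.Int.floordiv_lt_iff_lt_mul (a := lo + hi + 1) (b := 2) (q := hi + 1) (by omega)).mpr (by omega)
      omega
    omega

def r2longestPalindrome2_alt (strParam : String) : Int :=
  let t : List Char := PySem.Chars.join [] (PySem.Chars.split₀ (PySem.Chars.lower strParam.toList))
  let n : Int := PySem.Chars.len t
  r2search t n 0 n

-- ===== PRECONDITION & SPEC =====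
def Spec_r2longestPalindrome2 (strParam : String) (out : Int) : Prop := out = r2longestPalindrome2_alt strParam
instance (strParam : String) (out : Int) : Decidable (Spec_r2longestPalindrome2 strParam out) := by unfold Spec_r2longestPalindrome2; infer_instance

-- ===== CLAIM (what is proved, stated in full; the proofs are below) =====
def Claim_equal_r2longestPalindrome2 : Prop := ∀ (strParam : String), Dom_r2longestPalindrome2 strParam → Spec_r2longestPalindrome2 strParam (r2longestPalindrome2 strParam)

-- ===== LEMMAS AND PROOFS =====

-- the window t[i:i+L] and the property "some length-L window reversed occurs in t"
def pvWin (t : List Char) (i L : Nat) : List Char := (t.drop i).take L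

def pvGood (t : List Char) (L : Nat) : Prop :=
  ∃ i, i + L ≤ t.length ∧ (pvWin t i L).reverse <:+: t

theorem pvWin_length {t : List Char} {i L : Nat} (h : i + L ≤ t.length) :
    (pvWin t i L).length = L := by
  simp [pvWin]; omega

theorem pvWin_infix (t : List Char) (i L : Nat) : pvWin t i L <:+: t :=
  (List.take_prefix _ _).isInfix.trans (List.drop_suffix _ _).isInfix

-- a list is an infix of t iff it is a window of t (of its own length)
theorem infix_iff_win {sub t : List Char} :
    sub <:+: t ↔ ∃ k, k + sub.length ≤ t.length ∧ sub = pvWin t k sub.length := by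
  constructor
  · rintro ⟨s, e, rfl⟩
    refine ⟨s.length, ?_, ?_⟩
    · simp
    · rw [List.append_assoc]
      simp [pvWin]
  · rintro ⟨k, hk, h⟩
    rw [h]
    exact pvWin_infix t k _

-- the probed property is monotone: a shorter window inherits it from a longer one
theorem pvGood_mono {t : List Char} {l m : Nat} (h : m ≤ l) (hg : pvGood t l) : pvGood t m := by
  obtain ⟨i, hi, hinf⟩ := hg
  refine ⟨i, by omega, ?_⟩
  have he : pvWin t i m = (pvWin t i l).take m := by
    unfold pvWin
    rw [List.take_take]
    congr 1
    omega
  have hpre : pvWin t i m <+: pvWin t i l := by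
    rw [he]; exact List.take_prefix _ _
  exact (List.reverse_suffix.mpr hpre).isInfix.trans hinf

-- generic running-max-under-condition fold lemmas
theorem condmax_le {ι : Type} (xs : List ι) (q : ι → Bool) (v : ι → Int) (a : Int) :
    a ≤ xs.foldl (fun acc x => if q x then max acc (v x) else acc) a := by
  induction xs generalizing a with
  | nil => simp
  | cons x xs ih =>
    simp only [List.foldl_cons]
    refine le_trans ?_ (ih _)
    split <;> omega

theorem condmax_ub {ι : Type} (xs : List ι) (q : ι → Bool) (v : ι → Int) (a : Int) :
    ∀ x ∈ xs, q x = true → v x ≤ xs.foldl (fun acc x => if q x then max acc (v x) else acc) a := by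
  induction xs generalizing a with
  | nil => simp
  | cons y ys ih =>
    intro x hx hq
    simp only [List.foldl_cons]
    rcases List.mem_cons.mp hx with rfl | hx
    · refine le_trans ?_ (condmax_le ys q v _)
      simp [hq]
    · exact ih _ x hx hq

theorem condmax_mem {ι : Type} (xs : List ι) (q : ι → Bool) (v : ι → Int) (a : Int) :
    xs.foldl (fun acc x => if q x then max acc (v x) else acc) a = a ∨
      ∃ x ∈ xs, q x = true ∧
        xs.foldl (fun acc x => if q x then max acc (v x) else acc) a = v x := by
  induction xs generalizing a with
  | nil => simp
  | cons y ys ih =>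
    simp only [List.foldl_cons]
    rcases ih (if q y then max a (v y) else a) with h | ⟨x, hx, hq, h⟩
    · by_cases hqy : q y = true
      · rcases max_cases a (v y) with ⟨hm, _⟩ | ⟨hm, _⟩
        · left; simpa [hqy, hm] using h
        · right; exact ⟨y, by simp, hqy, by simpa [hqy, hm] using h⟩
      · left; simpa [hqy] using h
    · right; exact ⟨x, by simp [hx], hq, h⟩

-- windows as Int slices
theorem slice_win {t : List Char} {a b : Int} (h0 : 0 ≤ a) (h1 : a ≤ b) :
    PySem.List.slice t (some a) (some b) = pvWin t a.toNat (b - a).toNat := by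
  rw [PySem.List.slice_toNat t h0 (by omega)]
  unfold pvWin
  congr 1
  omega

-- B's probe holds at L (1 ≤ L ≤ n) iff pvGood t L.toNat
theorem r2ok_iff {t : List Char} {L : Int} (h1 : 1 ≤ L) (_h2 : L ≤ (t.length : Int)) :
    r2ok t (t.length : Int) L = true ↔ pvGood t L.toNat := by
  simp only [r2ok, List.any_eq_true, PySem.List.slice?_none_none_neg_one, Option.getD_some,
    PySem.Set.contains_iff, PySem.Set.mem_ofList, List.mem_map, PySem.List.mem_pyRange_one]
  constructor
  · rintro ⟨i, ⟨hi0, _⟩, k, ⟨⟨hk0, hk1⟩, hk⟩⟩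
    refine ⟨i.toNat, by omega, ?_⟩
    rw [slice_win hk0 (by omega), slice_win hi0 (by omega)] at hk
    have e1 : k + L - k = L := by ring
    have e2 : i + L - i = L := by ring
    rw [e1, e2] at hk
    rw [← hk]
    exact pvWin_infix t k.toNat _
  · rintro ⟨i, hi, hinf⟩
    have hlen : (pvWin t i L.toNat).reverse.length = L.toNat := by
      rw [List.length_reverse, pvWin_length hi]
    obtain ⟨k, hk, hkeq⟩ := infix_iff_win.mp hinf
    rw [hlen] at hk hkeq
    refine ⟨(i : Int), ⟨by omega, by omega⟩, (k : Int), ⟨⟨by omega, by omega⟩, ?_⟩⟩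
    rw [slice_win (by omega) (by omega), slice_win (by omega) (by omega)]
    have e1 : (k : Int) + L - k = L := by ring
    have e2 : (i : Int) + L - i = L := by ring
    rw [e1, e2]
    simp only [Int.toNat_natCast]
    exact hkeq.symm

-- the binary search returns the greatest length with the (monotone) pvGood property
theorem r2search_spec {t : List Char} {lo hi : Int} (hlo : 0 ≤ lo) (hlh : lo ≤ hi)
    (hhi : hi ≤ (t.length : Int))
    (hlg : lo = 0 ∨ (1 ≤ lo ∧ pvGood t lo.toNat))
    (hub : ∀ x : Int, hi < x → x ≤ (t.length : Int) → ¬ pvGood t x.toNat) :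
    (r2search t (t.length : Int) lo hi = 0 ∨
      (1 ≤ r2search t (t.length : Int) lo hi ∧ pvGood t (r2search t (t.length : Int) lo hi).toNat)) ∧
    0 ≤ r2search t (t.length : Int) lo hi ∧
    r2search t (t.length : Int) lo hi ≤ (t.length : Int) ∧
    ∀ x : Int, r2search t (t.length : Int) lo hi < x → x ≤ (t.length : Int) →
      ¬ pvGood t x.toNat := by
  obtain ⟨k, hk⟩ : ∃ k, (hi - lo).toNat = k := ⟨_, rfl⟩
  induction k using Nat.strong_induction_on generalizing lo hi with
  | _ k ih =>
    by_cases h : lo < hi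
    · rw [r2search, dif_pos h]
      have h1 : lo + 1 ≤ PySem.Int.floordiv (lo + hi + 1) 2 :=
        (PySem.Int.le_floordiv_iff_mul_le (a := lo + hi + 1) (b := 2) (q := lo + 1) (by omega)).mpr (by omega)
      have h2 : PySem.Int.floordiv (lo + hi + 1) 2 ≤ hi := by
        have := (PySem.Int.floordiv_lt_iff_lt_mul
          (a := lo + hi + 1) (b := 2) (q := hi + 1) (by omega)).mpr (by omega)
        omega
      set mid := PySem.Int.floordiv (lo + hi + 1) 2 with hmid
      cases hok : r2ok t (t.length : Int) mid with
      | true =>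
        simp only [if_true]
        exact ih (hi - mid).toNat (by omega) (by omega) (by omega) hhi
          (Or.inr ⟨by omega, (r2ok_iff (L := mid) (by omega) (by omega)).mp hok⟩) hub rfl
      | false =>
        simp only [Bool.false_eq_true, if_false]
        refine ih (mid - 1 - lo).toNat (by omega) hlo (by omega) (by omega) hlg ?_ rfl
        intro x hx1 hx2 hgood
        by_cases hxh : hi < x
        · exact hub x hxh hx2 hgood
        · have hmono : pvGood t mid.toNat :=
            pvGood_mono (l := x.toNat) (by omega) hgood
          rw [← r2ok_iff (L := mid) (by omega) (by omega)] at hmono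
          rw [hok] at hmono
          exact Bool.noConfusion hmono
    · rw [r2search, dif_neg h]
      refine ⟨hlg, hlo, by omega, fun x hx1 hx2 => hub x (by omega) hx2⟩

-- the pair list A iterates over, its test and its candidate value
def pvPairs (t : List Char) : List (Int × Int) :=
  (PySem.List.pyRange 0 (t.length : Int) 1).flatMap
    (fun i => (PySem.List.pyRange (t.length : Int) i (-1)).map (fun j => (i, j)))

def pvQ (t : List Char) (p : Int × Int) : Bool :=
  PySem.Chars.isIn ((PySem.List.slice t (some p.1) (some p.2)).reverse) t

def pvV (t : List Char) (p : Int × Int) : Int :=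
  ((PySem.List.slice t (some p.1) (some p.2)).length : Int)

theorem mem_pvPairs {t : List Char} {p : Int × Int} :
    p ∈ pvPairs t ↔ 0 ≤ p.1 ∧ p.1 < p.2 ∧ p.2 ≤ (t.length : Int) := by
  cases p with
  | mk i j =>
    simp only [pvPairs, List.mem_flatMap, List.mem_map, PySem.List.mem_pyRange_one,
      PySem.List.mem_pyRange_neg_one, Prod.mk.injEq]
    constructor
    · rintro ⟨a, ⟨ha0, ha1⟩, b, ⟨hb1, hb2⟩, rfl, rfl⟩
      exact ⟨ha0, hb1, hb2⟩
    · rintro ⟨h0, h1, h2⟩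
      exact ⟨i, ⟨h0, by omega⟩, j, ⟨h1, h2⟩, rfl, rfl⟩

theorem pvV_eq {t : List Char} {p : Int × Int} (h : p ∈ pvPairs t) : pvV t p = p.2 - p.1 := by
  obtain ⟨h0, h1, h2⟩ := mem_pvPairs.mp h
  rw [pvV, slice_win h0 (by omega), pvWin_length (by omega)]
  omega

theorem pvQ_iff {t : List Char} {p : Int × Int} (h : p ∈ pvPairs t) :
    pvQ t p = true ↔ (pvWin t p.1.toNat (p.2 - p.1).toNat).reverse <:+: t := by
  obtain ⟨h0, h1, h2⟩ := mem_pvPairs.mp h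
  rw [pvQ, slice_win h0 (by omega)]
  exact PySem.Chars.isIn_iff_infix _ _

theorem pvGood_pair {t : List Char} {l : Nat} (h1 : 1 ≤ l) (h2 : l ≤ t.length) :
    pvGood t l ↔ ∃ p ∈ pvPairs t, pvQ t p = true ∧ pvV t p = (l : Int) := by
  constructor
  · rintro ⟨i, hi, hinf⟩
    refine ⟨((i : Int), (i : Int) + (l : Int)), mem_pvPairs.mpr ⟨by omega, by omega, by omega⟩, ?_, ?_⟩
    · rw [pvQ_iff (mem_pvPairs.mpr ⟨by omega, by omega, by omega⟩)]
      have e : ((i : Int) + l - i) = (l : Int) := by ring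
      rw [e]
      simpa only [Int.toNat_natCast] using hinf
    · rw [pvV_eq (mem_pvPairs.mpr ⟨by omega, by omega, by omega⟩)]
      ring
  · rintro ⟨p, hp, hq, hv⟩
    obtain ⟨h0, hlt, hle⟩ := mem_pvPairs.mp hp
    have hv' := pvV_eq hp
    refine ⟨p.1.toNat, by omega, ?_⟩
    have e : (p.2 - p.1).toNat = l := by omega
    rw [← e]
    exact (pvQ_iff hp).mp hq

-- A's nested fold is the conditional-max fold over pvPairs
theorem A_eq_pairs (t : List Char) :
    (PySem.List.pyRange 0 (t.length : Int) 1).foldl (fun result i =>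
      (PySem.List.pyRange (t.length : Int) i (-1)).foldl (fun result j =>
        let strReversed := PySem.List.slice t (some i) (some j)
        if PySem.Chars.isIn ((PySem.List.slice? strReversed none none (-1)).getD []) t
             && decide (result < (strReversed.length : Int))
        then (strReversed.length : Int) else result) result) 0
    = (pvPairs t).foldl (fun acc p => if pvQ t p then max acc (pvV t p) else acc) 0 := by
  rw [pvPairs, List.flatMap_def, List.foldl_flatten, List.foldl_map]
  apply PySem.List.foldl_congr_mem
  intro acc i _
  rw [List.foldl_map]
  apply PySem.List.foldl_congr_mem
  intro acc2 j _
  simp only [pvQ, pvV, PySem.List.slice?_none_none_neg_one, Option.getD_some]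
  cases hq : PySem.Chars.isIn ((PySem.List.slice t (some i) (some j)).reverse) t with
  | false => simp
  | true =>
    simp only [Bool.true_and, if_true]
    split
    · rename_i hlt
      simp only [decide_eq_true_eq] at hlt
      omega
    · rename_i hlt
      simp only [decide_eq_true_eq] at hlt
      omega

-- A's nested fold equals B's binary search, for any list
theorem core_eq (t : List Char) :
    (PySem.List.pyRange 0 (t.length : Int) 1).foldl (fun result i =>
      (PySem.List.pyRange (t.length : Int) i (-1)).foldl (fun result j =>
        let strReversed := PySem.List.slice t (some i) (some j)
        if PySem.Chars.isIn ((PySem.List.slice? strReversed none none (-1)).getD []) t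
             && decide (result < (strReversed.length : Int))
        then (strReversed.length : Int) else result) result) 0
    = r2search t (t.length : Int) 0 (t.length : Int) := by
  rw [A_eq_pairs]
  obtain ⟨hR, hR0, hRn, hRmax⟩ := r2search_spec (t := t) (lo := 0) (hi := (t.length : Int))
    (by omega) (by omega) (by omega) (Or.inl rfl) (fun x hx1 hx2 _ => by omega)
  set R := r2search t (t.length : Int) 0 (t.length : Int) with hRdef
  rcases hR with hR | ⟨hR1, hgood⟩
  · rw [hR]
    rcases condmax_mem (pvPairs t) (pvQ t) (pvV t) 0 with h | ⟨p, hp, hq, h⟩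
    · exact h
    · exfalso
      obtain ⟨h0, h1, h2⟩ := mem_pvPairs.mp hp
      have hgood : pvGood t (p.2 - p.1).toNat :=
        ⟨p.1.toNat, by omega, (pvQ_iff hp).mp hq⟩
      exact hRmax (p.2 - p.1) (by omega) (by omega) hgood
  · obtain ⟨p, hp, hq, hv⟩ := (pvGood_pair (l := R.toNat) (by omega) (by omega)).mp hgood
    have hub := condmax_ub (pvPairs t) (pvQ t) (pvV t) 0 p hp hq
    rw [hv] at hub
    rcases condmax_mem (pvPairs t) (pvQ t) (pvV t) 0 with h | ⟨p', hp', hq', h⟩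
    · omega
    · obtain ⟨h0, h1, h2⟩ := mem_pvPairs.mp hp'
      have hv' := pvV_eq hp'
      by_cases hgt : R < p'.2 - p'.1
      · exfalso
        have hgood' : pvGood t (p'.2 - p'.1).toNat :=
          ⟨p'.1.toNat, by omega, (pvQ_iff hp').mp hq'⟩
        exact hRmax (p'.2 - p'.1) (by omega) (by omega) hgood'
      · omega

-- ===== VERDICT (by name: the statement is the Claim_ definition above) =====
theorem r2longestPalindrome2_spec : Claim_equal_r2longestPalindrome2 := by
  intro s _
  unfold Spec_r2longestPalindrome2 r2longestPalindrome2 r2longestPalindrome2_alt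
  simp only [PySem.Chars.len_eq]
  exact core_eq _
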